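-- pv_equiv track=rewrite | github.com/ravwanbek/dict_basic_homework | oldest_person.py | oldest
-- ===== SOURCE A (Python) =====
-- def oldest(people:dict):
--     """
--     Given a dictionary containing the names and ages of a group of people, return the name of the oldest person.
--     Args:
--         people(dict): parameter
--     Returns:
--         str: the name of the oldest person
--     """
--     a=[]
--     for x in people.values():
--         a.append(x)
--
--     largest=a[0]
--
--     for y in a:
--             if y>largest:
--                 largest=y
--     for i,j in people.items():
--         if j==largest:
--             return str(i)
-- ===== SOURCE B (Python) =====
-- def oldest(people: dict):
--     # Stable descending sort by age; the top pair's name is the first-inserted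
--     # person with the maximum age, exactly as A's scan-for-max-then-rescan finds.
--     return str(sorted(people.items(), key=lambda kv: kv[1], reverse=True)[0][0])
-- ===== Notes on version B (the rewrite author's own statement) =====
-- stated objective: simpler
-- what changed: Replaced A's three passes (collect values, scan for max, rescan items for the first match) with a single stable reverse sort of the items followed by taking the top pair's name.
import Mathlib
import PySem

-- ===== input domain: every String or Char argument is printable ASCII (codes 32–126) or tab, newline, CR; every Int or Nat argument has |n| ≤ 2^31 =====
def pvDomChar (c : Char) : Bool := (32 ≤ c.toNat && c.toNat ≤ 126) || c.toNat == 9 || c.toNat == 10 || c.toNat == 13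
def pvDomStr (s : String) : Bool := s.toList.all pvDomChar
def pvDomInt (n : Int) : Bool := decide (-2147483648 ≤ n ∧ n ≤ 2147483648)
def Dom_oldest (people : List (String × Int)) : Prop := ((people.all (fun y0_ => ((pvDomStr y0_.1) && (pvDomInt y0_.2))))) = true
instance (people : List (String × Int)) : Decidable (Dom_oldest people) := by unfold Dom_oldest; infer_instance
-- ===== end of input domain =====

-- B replaces A's collect-values / scan-for-max / rescan-for-name passes with a single
-- stable reverse sort of the items followed by taking the top pair's name (objective: simpler).


-- ===== PORT A =====
-- 'for i,j in people.items(): if j==largest: return str(i)'; the final [] case is Python's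
-- implicit None fall-through, unreachable because largest is always a value of the dict.
def oldestFind : List (String × Int) → Int → String
  | [], _ => ""
  | (i, j) :: rest, largest => if j == largest then i else oldestFind rest largest

def oldest (people : List (String × Int)) : String :=
  let a := people.foldl (fun acc kv => acc ++ [kv.2]) ([] : List Int)
  match PySem.List.pyGet? a 0 with
  | none => ""   -- a[0] raises IndexError on the empty dict; excluded by Pre_oldest
  | some l0 =>
    let largest := a.foldl (fun largest y => if largest < y then y else largest) l0
    oldestFind people largest

-- ===== PORT B =====
def oldest_alt (people : List (String × Int)) : String :=
  match PySem.List.pyGet? (PySem.List.sorted people (fun kv => kv.2) true) 0 with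
  | some kv => kv.1   -- str(name) on a str key is the key itself
  | none => ""        -- [0] raises IndexError on the empty dict; excluded by Pre_oldest

-- ===== PRECONDITION & SPEC =====
-- Pre_ excludes only the empty dict, on which both A and B raise IndexError.
def Pre_oldest (people : List (String × Int)) : Prop := people ≠ []
instance (people : List (String × Int)) : Decidable (Pre_oldest people) := by unfold Pre_oldest; infer_instance
def pvWitness_oldest : (List (String × Int)) := [("amy", 30), ("bob", 41), ("cal", 41)]

def Spec_oldest (people : List (String × Int)) (out : String) : Prop := out = oldest_alt people
instance (people : List (String × Int)) (out : String) : Decidable (Spec_oldest people out) := by unfold Spec_oldest; infer_instance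

-- ===== CLAIM (what is proved, stated in full; the proofs are below) =====
def Claim_equal_oldest : Prop := ∀ (people : List (String × Int)), Dom_oldest people → Pre_oldest people → Spec_oldest people (oldest people)

-- ===== LEMMAS AND PROOFS =====

-- xs[0] on a nonempty list
theorem pv_pyGet?_zero {alpha : Type} (x : alpha) (l : List alpha) : PySem.List.pyGet? (x :: l) 0 = some x := by
  simp [PySem.List.pyGet?, PySem.List.pyIdx?]

-- the running "first maximum" pair of A's logic, shared shape of both proofs
def pvStep (b x : String × Int) : String × Int := if b.2 < x.2 then x else b

-- head of the insertion-sort fold is the running first-max pair (stability of B's sort)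
theorem pv_head_fold (xs : List (String × Int)) (m : String × Int) (t : List (String × Int)) :
    (xs.foldl (fun acc x => PySem.List.insertBy (fun a b => decide (b.2 < a.2)) x acc) (m :: t)).head?
      = some (xs.foldl pvStep m) := by
  induction xs generalizing m t with
  | nil => rfl
  | cons x xs ih =>
    simp only [List.foldl_cons, PySem.List.insertBy, pvStep]
    by_cases h : m.2 < x.2
    · simp only [h, decide_true, if_true, ih x (m :: t)]
    · simp only [h, decide_false, Bool.false_eq_true, if_false]
      exact ih m _

-- A's rescan loop, run with the fold's maximum, finds exactly the fold's pair
theorem pv_find_main (xs : List (String × Int)) (p : String × Int) :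
    xs.foldl pvStep p = p ∨
      (p.2 < (xs.foldl pvStep p).2 ∧ oldestFind xs (xs.foldl pvStep p).2 = (xs.foldl pvStep p).1) := by
  induction xs generalizing p with
  | nil => exact Or.inl rfl
  | cons x xs ih =>
    simp only [List.foldl_cons, pvStep]
    by_cases h : p.2 < x.2
    · simp only [h, if_true]
      refine Or.inr ?_
      rcases ih x with h1 | h1
      · rw [h1]
        exact ⟨h, by simp [oldestFind]⟩
      · refine ⟨lt_trans h h1.1, ?_⟩
        obtain ⟨hx, hfind⟩ := h1
        obtain ⟨i, j⟩ := x
        simp only [oldestFind, beq_iff_eq]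
        rw [if_neg (ne_of_lt hx), hfind]
    · simp only [h, if_false]
      rcases ih p with h1 | h1
      · exact Or.inl h1
      · refine Or.inr ⟨h1.1, ?_⟩
        obtain ⟨hp, hfind⟩ := h1
        obtain ⟨i, j⟩ := x
        have hxj : ¬ (j = (xs.foldl pvStep p).2) := by
          intro he; exact h (he ▸ hp)
        simp only [oldestFind, beq_iff_eq, if_neg hxj, hfind]

-- the value fold of A equals the second component of the pair fold
theorem pv_fold_snd (xs : List (String × Int)) (p : String × Int) :
    (xs.map Prod.snd).foldl (fun l y => if l < y then y else l) p.2 = (xs.foldl pvStep p).2 := by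
  induction xs generalizing p with
  | nil => rfl
  | cons x xs ih =>
    simp only [List.map_cons, List.foldl_cons, pvStep]
    by_cases h : p.2 < x.2
    · simp only [h, if_true]; exact ih x
    · simp only [h, if_false]; exact ih p

-- ===== VERDICT (by name: the statement is the Claim_ definition above) =====
theorem oldest_spec : Claim_equal_oldest := by
  intro people _ hpre
  unfold Spec_oldest oldest oldest_alt
  cases people with
  | nil => exact absurd rfl hpre
  | cons p ps =>
    rw [PySem.List.sorted_rev_eq_foldl_insertBy]
    simp only [List.foldl_cons, PySem.List.insertBy]
    have hb := pv_head_fold ps p []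
    -- name B's head and decompose the sorted list
    obtain ⟨t, hL⟩ : ∃ t, (ps.foldl (fun acc x => PySem.List.insertBy (fun a b => decide (b.2 < a.2)) x acc) [p])
        = (ps.foldl pvStep p) :: t := by
      cases hf : (ps.foldl (fun acc x => PySem.List.insertBy (fun a b => decide (b.2 < a.2)) x acc) [p]) with
      | nil => rw [hf] at hb; exact absurd hb (by simp)
      | cons a t =>
        rw [hf] at hb
        simp only [List.head?_cons, Option.some.injEq] at hb
        exact ⟨t, by rw [hb]⟩
    rw [hL, PySem.List.foldl_append_singleton_eq_map, List.nil_append, List.singleton_append]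
    simp only [pv_pyGet?_zero]
    -- A's value fold equals the pair fold's second component
    have hv : (p.2 :: ps.map Prod.snd).foldl (fun largest y => if largest < y then y else largest) p.2
        = (ps.foldl pvStep p).2 := by
      simp only [List.foldl_cons, lt_self_iff_false, if_false]
      exact pv_fold_snd ps p
    rw [hv]
    rcases pv_find_main ps p with h1 | h1
    · obtain ⟨i, j⟩ := p
      simp [oldestFind, h1]
    · obtain ⟨i, j⟩ := p
      have hne : j ≠ (ps.foldl pvStep (i, j)).2 := ne_of_lt h1.1
      simp only [oldestFind, beq_iff_eq]
      rw [if_neg hne, h1.2]
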